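-- pv_equiv track=rewrite | github.com/eevlogieva/HackBulgaria | Problem_set_1/balanced_number.py | is_number_balanced
-- ===== SOURCE A (Python) =====
-- def is_number_balanced(n):
--     left_sum = 0
--     right_sum = 0
--     digits = len(str(n))
--     if digits % 2 == 0:
--         for index in range(digits // 2):
--             right_sum += n % 10
--             n //= 10
--         while(n):
--             left_sum += n % 10
--             n //= 10
--     elif digits == 1:
--         return True
--     else:
--         for digit in range(digits // 2):
--             right_sum += n % 10
--             n //= 10
--         n //= 10
--         while(n):
--             left_sum += n % 10
--             n //= 10
--     return left_sum == right_sum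
-- ===== SOURCE B (Python) =====
-- def is_number_balanced(n):
--     s = str(n)
--     half = len(s) // 2
--     if len(s) == 1:
--         return True
--     return sum(int(c) for c in s[:half]) == sum(int(c) for c in s[len(s) - half:])
-- ===== Notes on version B (the rewrite author's own statement) =====
-- stated objective: idiomatic
-- what changed: B converts the number to its decimal string once and compares the digit sums of the two half slices, replacing A's two mod/floordiv digit-peeling loops over the shrinking integer; Pre_ excludes negative n, on which A's while loop never terminates (n //= 10 sticks at -1).
import Mathlib
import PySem

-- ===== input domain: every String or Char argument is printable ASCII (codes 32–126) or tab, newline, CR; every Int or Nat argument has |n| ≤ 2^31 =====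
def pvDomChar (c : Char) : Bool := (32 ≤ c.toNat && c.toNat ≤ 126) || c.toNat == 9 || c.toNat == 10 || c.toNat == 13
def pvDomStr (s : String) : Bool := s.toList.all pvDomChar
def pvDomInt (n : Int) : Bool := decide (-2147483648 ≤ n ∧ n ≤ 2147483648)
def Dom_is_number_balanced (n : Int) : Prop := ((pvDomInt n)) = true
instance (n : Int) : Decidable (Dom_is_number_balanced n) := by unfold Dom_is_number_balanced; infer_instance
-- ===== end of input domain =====

-- B replaces A's two mod/floordiv digit-peeling loops by one str(n) conversion and a digit-sum
-- comparison of the two half slices (objective: idiomatic; same asymptotic cost).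

-- ===== PORT A =====
-- 'while(n): left_sum += n % 10; n //= 10'. The fuel argument only totalizes the loop
-- (Python diverges on n < 0, which Pre_ excludes); inside Pre_ the fuel is never exhausted.
def pvWhileA : Nat → Int → Int → Int
  | 0, _, s => s
  | f + 1, n, s =>
    if n ≠ 0 then pvWhileA f (PySem.Int.floordiv n 10) (s + PySem.Int.mod n 10) else s

def is_number_balanced (n : Int) : Bool :=
  let digits : Int := PySem.Str.len (PySem.Int.toStr n)
  if PySem.Int.mod digits 2 = 0 then
    let st := (PySem.List.pyRange 0 (PySem.Int.floordiv digits 2) 1).foldl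
        (fun (p : Int × Int) _ => (PySem.Int.floordiv p.1 10, p.2 + PySem.Int.mod p.1 10)) (n, 0)
    let left := pvWhileA (st.1.natAbs + 1) st.1 0
    decide (left = st.2)
  else if digits = 1 then true
  else
    let st := (PySem.List.pyRange 0 (PySem.Int.floordiv digits 2) 1).foldl
        (fun (p : Int × Int) _ => (PySem.Int.floordiv p.1 10, p.2 + PySem.Int.mod p.1 10)) (n, 0)
    let n2 := PySem.Int.floordiv st.1 10
    let left := pvWhileA (n2.natAbs + 1) n2 0
    decide (left = st.2)

-- ===== PORT B =====
-- int(c) for a single character; .getD 0 only totalizes (on Pre_ every sliced char is a digit)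
def pvDigit (c : Char) : Int := (PySem.Int.ofChars? [c]).getD 0

def is_number_balanced_alt (n : Int) : Bool :=
  let s := (PySem.Int.toStr n).toList
  let len : Int := PySem.Str.len (PySem.Int.toStr n)
  let half := PySem.Int.floordiv len 2
  if len = 1 then true
  else decide (((PySem.List.slice s none (some half)).map pvDigit).sum
      = ((PySem.List.slice s (some (len - half)) none).map pvDigit).sum)

-- ===== PRECONDITION & SPEC =====
-- Pre_ excludes negative n: there Python A never returns (n //= 10 reaches -1 and the
-- while loop runs forever), so no value of A exists to match.
def Pre_is_number_balanced (n : Int) : Prop := 0 ≤ n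
instance (n : Int) : Decidable (Pre_is_number_balanced n) := by
  unfold Pre_is_number_balanced; infer_instance

def pvWitness_is_number_balanced : Int := (1234)

def Spec_is_number_balanced (n : Int) (out : Bool) : Prop := out = is_number_balanced_alt n
instance (n : Int) (out : Bool) : Decidable (Spec_is_number_balanced n out) := by
  unfold Spec_is_number_balanced; infer_instance

-- ===== CLAIM (what is proved, stated in full; the proofs are below) =====
def Claim_equal_is_number_balanced : Prop := ∀ (n : Int), Dom_is_number_balanced n → Pre_is_number_balanced n → Spec_is_number_balanced n (is_number_balanced n)

-- ===== LEMMAS AND PROOFS =====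

-- the decimal digit characters of a natural number, high digit first (c.f. Nat.toDigits 10)
def pvNatChars (m : Nat) : List Char :=
  if _h : m < 10 then [Nat.digitChar m]
  else pvNatChars (m / 10) ++ [Nat.digitChar (m % 10)]
decreasing_by exact Nat.div_lt_self (by omega) (by omega)

-- digit sum of all digits (0 for 0, matching an unentered while loop)
def pvDigSum (m : Nat) : Nat :=
  if m = 0 then 0 else m % 10 + pvDigSum (m / 10)
decreasing_by exact Nat.div_lt_self (by omega) (by omega)

-- sum of the k lowest decimal digits
def pvLowSum : Nat → Nat → Nat
  | 0, _ => 0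
  | k + 1, m => m % 10 + pvLowSum k (m / 10)

theorem pv_toDigitsCore_eq : ∀ (f m : Nat) (acc : List Char), m < f →
    Nat.toDigitsCore 10 f m acc = pvNatChars m ++ acc := by
  intro f
  induction f with
  | zero => intro m acc h; omega
  | succ f ih =>
    intro m acc h
    rw [Nat.toDigitsCore]
    by_cases hq : m / 10 = 0
    · have hm : m < 10 := by omega
      rw [if_pos hq, pvNatChars, dif_pos hm, Nat.mod_eq_of_lt hm]
      simp
    · have hm : ¬ m < 10 := by
        intro hc; exact hq (Nat.div_eq_of_lt hc)
      have hrw : pvNatChars m = pvNatChars (m / 10) ++ [Nat.digitChar (m % 10)] := by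
        rw [pvNatChars]; rw [dif_neg hm]
      rw [if_neg hq, ih (m / 10) _ (by omega), hrw]
      simp

theorem pv_toChars_eq (n : Int) (h : 0 ≤ n) :
    PySem.Int.toChars n = pvNatChars n.toNat := by
  rw [PySem.Int.toChars, if_neg (by omega), Nat.toDigits,
    pv_toDigitsCore_eq (n.toNat + 1) n.toNat [] (by omega)]
  simp

theorem pv_len_pos (m : Nat) : 1 ≤ (pvNatChars m).length := by
  rw [pvNatChars]
  split <;> simp

theorem pv_while_eq : ∀ (f : Nat) (t : Nat) (s : Int), t < f →
    pvWhileA f (t : Int) s = s + (pvDigSum t : Int) := by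
  intro f
  induction f with
  | zero => intro t s h; omega
  | succ f ih =>
    intro t s h
    by_cases ht : t = 0
    · subst ht
      rw [pvWhileA, pvDigSum]
      simp
    · have ht' : 0 < t := by omega
      have hlt : t / 10 < f := by
        have := Nat.div_lt_self ht' (show 1 < 10 by omega)
        omega
      have hfd : PySem.Int.floordiv ((t : Nat) : Int) 10 = ((t / 10 : Nat) : Int) := by
        exact_mod_cast PySem.Int.floordiv_natCast t 10
      have hmd : PySem.Int.mod ((t : Nat) : Int) 10 = ((t % 10 : Nat) : Int) := by
        exact_mod_cast PySem.Int.mod_natCast t 10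
      have hds : pvDigSum t = t % 10 + pvDigSum (t / 10) := by
        rw [pvDigSum]; rw [if_neg ht]
      rw [pvWhileA, if_pos (show ((t : Nat) : Int) ≠ 0 by exact_mod_cast ht), hfd, hmd,
        ih (t / 10) (s + ((t % 10 : Nat) : Int)) hlt, hds]
      push_cast
      ring

theorem pv_foldl_const {α β : Type} (l : List α) (g : β → β) (init : β) :
    l.foldl (fun p _ => g p) init = g^[l.length] init := by
  induction l generalizing init with
  | nil => rfl
  | cons x xs ih => simp [List.foldl_cons, ih, Function.iterate_succ_apply]

theorem pv_iter_eq : ∀ (k m : Nat) (s : Int),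
    (fun p : Int × Int => (PySem.Int.floordiv p.1 10, p.2 + PySem.Int.mod p.1 10))^[k]
      ((m : Int), s) = (((m / 10 ^ k : Nat) : Int), s + (pvLowSum k m : Nat)) := by
  intro k
  induction k with
  | zero => intro m s; simp [pvLowSum]
  | succ k ih =>
    intro m s
    rw [Function.iterate_succ_apply]
    have hfd : PySem.Int.floordiv ((m : Nat) : Int) 10 = ((m / 10 : Nat) : Int) := by
      exact_mod_cast PySem.Int.floordiv_natCast m 10
    have hmd : PySem.Int.mod ((m : Nat) : Int) 10 = ((m % 10 : Nat) : Int) := by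
      exact_mod_cast PySem.Int.mod_natCast m 10
    rw [hfd, hmd, ih (m / 10) (s + ((m % 10 : Nat) : Int))]
    have hdiv : m / 10 / 10 ^ k = m / 10 ^ (k + 1) := by
      rw [Nat.div_div_eq_div_mul, ← pow_succ']
    have hls : pvLowSum (k + 1) m = m % 10 + pvLowSum k (m / 10) := rfl
    rw [hdiv, hls, Prod.ext_iff]
    exact ⟨rfl, by push_cast; try ring⟩

theorem pv_take_eq : ∀ (j m : Nat), j < (pvNatChars m).length →
    (pvNatChars m).take ((pvNatChars m).length - j) = pvNatChars (m / 10 ^ j) := by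
  intro j
  induction j with
  | zero => intro m _; simp
  | succ j ih =>
    intro m hj
    by_cases hm : m < 10
    · rw [pvNatChars, dif_pos hm] at hj
      simp at hj
      try omega
    · have hrw : pvNatChars m = pvNatChars (m / 10) ++ [Nat.digitChar (m % 10)] := by
        rw [pvNatChars, dif_neg hm]
      rw [hrw]
      rw [hrw] at hj
      simp only [List.length_append, List.length_cons, List.length_nil] at hj ⊢
      have hle : (pvNatChars (m / 10)).length + 1 - (j + 1)
          = (pvNatChars (m / 10)).length - j := by omega
      rw [hle, List.take_append_of_le_length (by omega), ih (m / 10) (by omega)]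
      rw [Nat.div_div_eq_div_mul]
      congr 1
      rw [pow_succ']

theorem pv_digit_eq (d : Nat) (hd : d < 10) : pvDigit (Nat.digitChar d) = (d : Int) := by
  interval_cases d <;> decide

theorem pv_mapsum_eq (m : Nat) : ((pvNatChars m).map pvDigit).sum = (pvDigSum m : Int) := by
  induction m using pvNatChars.induct with
  | case1 m hm =>
    have h1 : pvNatChars m = [Nat.digitChar m] := by rw [pvNatChars]; rw [dif_pos hm]
    rw [h1]
    simp only [List.map_cons, List.map_nil, List.sum_cons, List.sum_nil, add_zero,
      pv_digit_eq m hm]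
    by_cases h0 : m = 0
    · subst h0; rw [pvDigSum]; simp
    · have hds : pvDigSum m = m % 10 + pvDigSum (m / 10) := by
        rw [pvDigSum]; rw [if_neg h0]
      have h2 : pvDigSum (m / 10) = 0 := by
        have hq : m / 10 = 0 := by omega
        rw [hq, pvDigSum]; simp
      rw [hds, h2, Nat.mod_eq_of_lt hm]
      simp
  | case2 m hm ih =>
    have hrw : pvNatChars m = pvNatChars (m / 10) ++ [Nat.digitChar (m % 10)] := by
      rw [pvNatChars]; rw [dif_neg hm]
    rw [hrw, List.map_append, List.sum_append]
    simp only [List.map_cons, List.map_nil, List.sum_cons, List.sum_nil, add_zero,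
      pv_digit_eq (m % 10) (Nat.mod_lt m (by omega)), ih]
    have hds : pvDigSum m = m % 10 + pvDigSum (m / 10) := by
      rw [pvDigSum]; rw [if_neg (by omega)]
    rw [hds]
    push_cast
    ring

theorem pv_drop_eq : ∀ (k m : Nat), k ≤ (pvNatChars m).length →
    (((pvNatChars m).drop ((pvNatChars m).length - k)).map pvDigit).sum
      = (pvLowSum k m : Int) := by
  intro k
  induction k with
  | zero => intro m _; simp [pvLowSum]
  | succ k ih =>
    intro m hk
    by_cases hm : m < 10
    · have h1 : pvNatChars m = [Nat.digitChar m] := by rw [pvNatChars, dif_pos hm]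
      rw [h1] at hk ⊢
      simp at hk
      have hk0 : k = 0 := by omega
      subst hk0
      simp only [List.length_cons, List.length_nil, Nat.sub_self, List.drop_zero,
        List.map_cons, List.map_nil, List.sum_cons, List.sum_nil, add_zero,
        pv_digit_eq m hm]
      have hls : pvLowSum 1 m = m % 10 + pvLowSum 0 (m / 10) := rfl
      rw [hls, Nat.mod_eq_of_lt hm]
      simp [pvLowSum]
    · have hrw : pvNatChars m = pvNatChars (m / 10) ++ [Nat.digitChar (m % 10)] := by
        rw [pvNatChars, dif_neg hm]
      rw [hrw] at hk ⊢
      simp only [List.length_append, List.length_cons, List.length_nil] at hk ⊢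
      have hle : (pvNatChars (m / 10)).length + 1 - (k + 1)
          = (pvNatChars (m / 10)).length - k := by omega
      rw [hle, List.drop_append_of_le_length (by omega), List.map_append, List.sum_append]
      rw [ih (m / 10) (by omega)]
      simp only [List.map_cons, List.map_nil, List.sum_cons, List.sum_nil, add_zero,
        pv_digit_eq (m % 10) (Nat.mod_lt m (by omega))]
      have hls : pvLowSum (k + 1) m = m % 10 + pvLowSum k (m / 10) := rfl
      rw [hls]
      push_cast
      ring

-- ===== VERDICT (by name: the statement is the Claim_ definition above) =====
theorem is_number_balanced_spec : Claim_equal_is_number_balanced := by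
  intro n _ hpre
  unfold Spec_is_number_balanced
  obtain ⟨m, rfl⟩ : ∃ m : Nat, n = (m : Int) := ⟨n.toNat, (Int.toNat_of_nonneg hpre).symm⟩
  have hL : (PySem.Int.toStr (m : Int)).toList = pvNatChars m := by
    rw [PySem.Int.toList_toStr, pv_toChars_eq _ (by positivity), Int.toNat_natCast]
  have hlen : PySem.Str.len (PySem.Int.toStr (m : Int)) = (((pvNatChars m).length : Nat) : Int) := by
    rw [PySem.Str.len_eq, hL]
  set L := (pvNatChars m).length with hLdef
  have hL1 : 1 ≤ L := pv_len_pos m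
  have hmod : PySem.Int.mod (L : Int) 2 = ((L % 2 : Nat) : Int) := by
    exact_mod_cast PySem.Int.mod_natCast L 2
  have hfd2 : PySem.Int.floordiv (L : Int) 2 = ((L / 2 : Nat) : Int) := by
    exact_mod_cast PySem.Int.floordiv_natCast L 2
  set k := L / 2 with hkdef
  have hfold : (PySem.List.pyRange 0 ((k : Nat) : Int) 1).foldl
      (fun (p : Int × Int) _ => (PySem.Int.floordiv p.1 10, p.2 + PySem.Int.mod p.1 10))
      ((m : Int), 0)
      = (((m / 10 ^ k : Nat) : Int), ((pvLowSum k m : Nat) : Int)) := by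
    rw [pv_foldl_const, PySem.List.length_pyRange_one,
      show (((k : Nat) : Int) - 0).toNat = k by omega, pv_iter_eq k m 0, zero_add]
  have hfold1 : ((PySem.List.pyRange 0 ((k : Nat) : Int) 1).foldl
      (fun (p : Int × Int) _ => (PySem.Int.floordiv p.1 10, p.2 + PySem.Int.mod p.1 10))
      ((m : Int), 0)).1 = ((m / 10 ^ k : Nat) : Int) := by rw [hfold]
  have hfold2 : ((PySem.List.pyRange 0 ((k : Nat) : Int) 1).foldl
      (fun (p : Int × Int) _ => (PySem.Int.floordiv p.1 10, p.2 + PySem.Int.mod p.1 10))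
      ((m : Int), 0)).2 = ((pvLowSum k m : Nat) : Int) := by rw [hfold]
  have hwhile : ∀ t : Nat, pvWhileA (((t : Nat) : Int).natAbs + 1) ((t : Nat) : Int) 0
      = ((pvDigSum t : Nat) : Int) := by
    intro t
    rw [Int.natAbs_natCast, pv_while_eq (t + 1) t 0 (by omega), zero_add]
  have hdropS : (((pvNatChars m).drop (L - k)).map pvDigit).sum = ((pvLowSum k m : Nat) : Int) := by
    have h := pv_drop_eq k m (by rw [← hLdef]; omega)
    rwa [← hLdef] at h
  unfold is_number_balanced is_number_balanced_alt
  simp only [hlen, hL, hmod, hfd2]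
  by_cases hp : L % 2 = 0
  · -- even number of digits
    have hL2 : 2 ≤ L := by omega
    rw [if_pos (show ((L % 2 : Nat) : Int) = 0 by exact_mod_cast hp),
      if_neg (show ¬ ((L : Nat) : Int) = 1 by exact_mod_cast (by omega : ¬ L = 1))]
    rw [hfold1, hfold2]
    have htake : (pvNatChars m).take k = pvNatChars (m / 10 ^ k) := by
      have h := pv_take_eq k m (by rw [← hLdef]; omega)
      rw [← hLdef] at h
      rwa [show L - k = k by omega] at h
    rw [PySem.List.slice_to_natCast,
      show ((L : Nat) : Int) - ((k : Nat) : Int) = ((L - k : Nat) : Int) by omega,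
      PySem.List.slice_from_natCast]
    rw [htake, hdropS, pv_mapsum_eq]
    rw [hwhile (m / 10 ^ k)]
  · by_cases h1 : L = 1
    · -- single digit
      rw [if_neg (show ¬ ((L % 2 : Nat) : Int) = 0 by exact_mod_cast (by omega : ¬ L % 2 = 0)),
        if_pos (show ((L : Nat) : Int) = 1 by exact_mod_cast h1),
        if_pos (show ((L : Nat) : Int) = 1 by exact_mod_cast h1)]
    · -- odd number of digits, at least 3
      have hL3 : 3 ≤ L := by omega
      rw [if_neg (show ¬ ((L % 2 : Nat) : Int) = 0 by exact_mod_cast (by omega : ¬ L % 2 = 0)),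
        if_neg (show ¬ ((L : Nat) : Int) = 1 by exact_mod_cast h1),
        if_neg (show ¬ ((L : Nat) : Int) = 1 by exact_mod_cast h1)]
      rw [hfold1, hfold2]
      have hfd10 : PySem.Int.floordiv (((m / 10 ^ k : Nat) : Nat) : Int) 10
          = ((m / 10 ^ k / 10 : Nat) : Int) := by
        exact_mod_cast PySem.Int.floordiv_natCast (m / 10 ^ k) 10
      have hdiv : m / 10 ^ k / 10 = m / 10 ^ (k + 1) := by
        rw [Nat.div_div_eq_div_mul, ← pow_succ]
      have htake : (pvNatChars m).take k = pvNatChars (m / 10 ^ (k + 1)) := by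
        have h := pv_take_eq (k + 1) m (by rw [← hLdef]; omega)
        rw [← hLdef] at h
        rwa [show L - (k + 1) = k by omega] at h
      rw [PySem.List.slice_to_natCast,
        show ((L : Nat) : Int) - ((k : Nat) : Int) = ((L - k : Nat) : Int) by omega,
        PySem.List.slice_from_natCast]
      rw [htake, hdropS, pv_mapsum_eq, hfd10, hdiv]
      rw [hwhile (m / 10 ^ (k + 1))]
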